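-- pv_equiv track=rewrite | github.com/elliottevers/pl_mus_label | src/scripts/musicxml_to_mid_biab.py | map_midi
-- ===== SOURCE A (Python) =====
-- def map_midi(pitch_midi_raw, intervalDesired):
--     if intervalDesired:
--         if pitch_midi_raw > intervalDesired[1]:
--             while (pitch_midi_raw > intervalDesired[1]):
--                 pitch_midi_raw -= 12
--         elif pitch_midi_raw < intervalDesired[0]:
--             while (pitch_midi_raw < intervalDesired[0]):
--                 pitch_midi_raw += 12
--
--     return pitch_midi_raw
-- ===== SOURCE B (Python) =====
-- def map_midi(pitch_midi_raw, intervalDesired):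
--     if intervalDesired:
--         hi = intervalDesired[1]
--         lo = intervalDesired[0]
--         if pitch_midi_raw > hi:
--             return pitch_midi_raw - 12 * (-(-(pitch_midi_raw - hi) // 12))
--         if pitch_midi_raw < lo:
--             return pitch_midi_raw + 12 * (-(-(lo - pitch_midi_raw) // 12))
--     return pitch_midi_raw
-- ===== Notes on version B (the rewrite author's own statement) =====
-- stated objective: simpler
-- what changed: The iterative +/-12 while loops are replaced by a single closed-form ceiling division computing the number of octave shifts.
import Mathlib
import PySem

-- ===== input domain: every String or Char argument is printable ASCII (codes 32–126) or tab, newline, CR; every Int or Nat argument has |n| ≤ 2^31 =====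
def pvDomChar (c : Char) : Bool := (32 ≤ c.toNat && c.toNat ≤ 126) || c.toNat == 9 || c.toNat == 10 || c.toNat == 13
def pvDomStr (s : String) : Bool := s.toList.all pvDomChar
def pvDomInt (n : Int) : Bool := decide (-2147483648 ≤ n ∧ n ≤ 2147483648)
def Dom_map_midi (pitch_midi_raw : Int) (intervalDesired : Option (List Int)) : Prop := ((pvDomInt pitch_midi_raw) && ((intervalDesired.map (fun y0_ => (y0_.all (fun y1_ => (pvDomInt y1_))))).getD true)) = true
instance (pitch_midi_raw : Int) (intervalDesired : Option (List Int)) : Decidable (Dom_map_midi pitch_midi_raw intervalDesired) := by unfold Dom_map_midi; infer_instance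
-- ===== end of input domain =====

-- B replaces A's iterative ±12 while loops with one closed-form ceiling division (simpler: no loops).

-- ===== PORT A =====
-- the `while pitch > hi: pitch -= 12` loop
def descendA (p hi : Int) : Int :=
  if p > hi then descendA (p - 12) hi else p
termination_by (p - hi).toNat
decreasing_by omega

-- the `while pitch < lo: pitch += 12` loop
def ascendA (p lo : Int) : Int :=
  if p < lo then ascendA (p + 12) lo else p
termination_by (lo - p).toNat
decreasing_by omega

def map_midi (pitch_midi_raw : Int) (intervalDesired : Option (List Int)) : Int :=
  match intervalDesired with
  | none => pitch_midi_raw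
  | some l =>
    if l.isEmpty then pitch_midi_raw
    else
      -- Pre_ guarantees pyGet? l 1 is some (length ≥ 2); Python raises IndexError otherwise
      let hi := (PySem.List.pyGet? l 1).getD 0
      let lo := (PySem.List.pyGet? l 0).getD 0
      if pitch_midi_raw > hi then descendA pitch_midi_raw hi
      else if pitch_midi_raw < lo then ascendA pitch_midi_raw lo
      else pitch_midi_raw

-- ===== PORT B =====
def map_midi_alt (pitch_midi_raw : Int) (intervalDesired : Option (List Int)) : Int :=
  match intervalDesired with
  | none => pitch_midi_raw
  | some l =>
    if l.isEmpty then pitch_midi_raw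
    else
      let hi := (PySem.List.pyGet? l 1).getD 0
      let lo := (PySem.List.pyGet? l 0).getD 0
      if pitch_midi_raw > hi then
        pitch_midi_raw - 12 * (-(PySem.Int.floordiv (-(pitch_midi_raw - hi)) 12))
      else if pitch_midi_raw < lo then
        pitch_midi_raw + 12 * (-(PySem.Int.floordiv (-(lo - pitch_midi_raw)) 12))
      else pitch_midi_raw

-- ===== PRECONDITION & SPEC =====
-- Pre_ excludes a one-element intervalDesired, on which Python's `intervalDesired[1]` raises IndexError.
def Pre_map_midi (pitch_midi_raw : Int) (intervalDesired : Option (List Int)) : Prop :=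
  (intervalDesired.getD []).length ≠ 1
instance (pitch_midi_raw : Int) (intervalDesired : Option (List Int)) : Decidable (Pre_map_midi pitch_midi_raw intervalDesired) := by unfold Pre_map_midi; infer_instance

def pvWitness_map_midi : Int × Option (List Int) := (80, some [48, 72])

def Spec_map_midi (pitch_midi_raw : Int) (intervalDesired : Option (List Int)) (out : Int) : Prop := out = map_midi_alt pitch_midi_raw intervalDesired
instance (pitch_midi_raw : Int) (intervalDesired : Option (List Int)) (out : Int) : Decidable (Spec_map_midi pitch_midi_raw intervalDesired out) := by unfold Spec_map_midi; infer_instance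

-- ===== CLAIM (what is proved, stated in full; the proofs are below) =====
def Claim_equal_map_midi : Prop := ∀ (pitch_midi_raw : Int) (intervalDesired : Option (List Int)), Dom_map_midi pitch_midi_raw intervalDesired → Pre_map_midi pitch_midi_raw intervalDesired → Spec_map_midi pitch_midi_raw intervalDesired (map_midi pitch_midi_raw intervalDesired)

-- ===== LEMMAS AND PROOFS =====

lemma descendA_of_bracket (n : Nat) : ∀ (p hi c : Int), (p - hi).toNat = n → hi < p →
    (c - 1) * 12 < p - hi → p - hi ≤ c * 12 → descendA p hi = p - 12 * c := by
  induction n using Nat.strong_induction_on with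
  | _ n ih =>
    intro p hi c hn h h1 h2
    rw [descendA, if_pos h]
    by_cases h' : hi < p - 12
    · rw [ih ((p - 12) - hi).toNat (by omega) (p - 12) hi (c - 1) rfl h' (by omega) (by omega)]
      ring
    · rw [descendA, if_neg (by omega)]
      omega

lemma ascendA_of_bracket (n : Nat) : ∀ (p lo c : Int), (lo - p).toNat = n → p < lo →
    (c - 1) * 12 < lo - p → lo - p ≤ c * 12 → ascendA p lo = p + 12 * c := by
  induction n using Nat.strong_induction_on with
  | _ n ih =>
    intro p lo c hn h h1 h2
    rw [ascendA, if_pos h]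
    by_cases h' : p + 12 < lo
    · rw [ih (lo - (p + 12)).toNat (by omega) (p + 12) lo (c - 1) rfl h' (by omega) (by omega)]
      ring
    · rw [ascendA, if_neg (by omega)]
      omega

lemma descendA_eq (p hi : Int) (h : hi < p) :
    descendA p hi = p - 12 * (-(PySem.Int.floordiv (-(p - hi)) 12)) := by
  obtain ⟨h1, h2⟩ :=
    (PySem.Int.neg_floordiv_neg_eq_iff_of_pos (a := p - hi) (b := 12)
      (q := -(PySem.Int.floordiv (-(p - hi)) 12)) (by norm_num)).mp rfl
  exact descendA_of_bracket (p - hi).toNat p hi _ rfl h h1 h2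

lemma ascendA_eq (p lo : Int) (h : p < lo) :
    ascendA p lo = p + 12 * (-(PySem.Int.floordiv (-(lo - p)) 12)) := by
  obtain ⟨h1, h2⟩ :=
    (PySem.Int.neg_floordiv_neg_eq_iff_of_pos (a := lo - p) (b := 12)
      (q := -(PySem.Int.floordiv (-(lo - p)) 12)) (by norm_num)).mp rfl
  exact ascendA_of_bracket (lo - p).toNat p lo _ rfl h h1 h2

-- ===== VERDICT (by name: the statement is the Claim_ definition above) =====
theorem map_midi_spec : Claim_equal_map_midi := by
  intro p iv _ _
  unfold Spec_map_midi map_midi map_midi_alt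
  cases iv with
  | none => rfl
  | some l =>
    by_cases he : l.isEmpty
    · simp [he]
    · simp only [he, if_false, Bool.false_eq_true]
      split_ifs with h1 h2
      · exact descendA_eq _ _ h1
      · exact ascendA_eq _ _ h2
      · rfl
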